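-- pv_equiv track=rewrite | github.com/QBI-Microscopy/SlideCrop_v2 | trial_separator.py | find_horizontal_transition_points
-- ===== SOURCE A (Python) =====
-- def find_horizontal_transition_points(row):
--     currently_zero = True if row[0] ==0 else False
--     transition_points = []
--     for i in range(len(row)-1):
--         if currently_zero:
--            if row[i+1] != 0:
--                transition_points.append(i+1)
--                currently_zero = False
--         else:
--             if row[i+1] == 0:
--                 transition_points.append(i)
--                 currently_zero = True
--     return transition_points
-- ===== SOURCE B (Python) =====
-- def find_horizontal_transition_points(row):
--     # Run-based scan: walk maximal runs of nonzero entries; each run [start, end]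
--     # contributes its leading boundary (start, unless the run begins the row) and
--     # its trailing boundary (end, unless the run ends the row).
--     n = len(row)
--     pts = []
--     i = 0
--     while i < n:
--         if row[i] != 0:
--             start = i
--             while i < n and row[i] != 0:
--                 i += 1
--             end = i - 1
--             if start != 0:
--                 pts.append(start)
--             if end != n - 1:
--                 pts.append(end)
--         else:
--             i += 1
--     return pts
-- ===== Notes on version B (the rewrite author's own statement) =====
-- stated objective: alternative
-- what changed: Replaced A's per-index boolean state machine over adjacent pairs by a run-based scan that walks maximal nonzero runs and emits each run's leading and trailing boundary indices.
import Mathlib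
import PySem

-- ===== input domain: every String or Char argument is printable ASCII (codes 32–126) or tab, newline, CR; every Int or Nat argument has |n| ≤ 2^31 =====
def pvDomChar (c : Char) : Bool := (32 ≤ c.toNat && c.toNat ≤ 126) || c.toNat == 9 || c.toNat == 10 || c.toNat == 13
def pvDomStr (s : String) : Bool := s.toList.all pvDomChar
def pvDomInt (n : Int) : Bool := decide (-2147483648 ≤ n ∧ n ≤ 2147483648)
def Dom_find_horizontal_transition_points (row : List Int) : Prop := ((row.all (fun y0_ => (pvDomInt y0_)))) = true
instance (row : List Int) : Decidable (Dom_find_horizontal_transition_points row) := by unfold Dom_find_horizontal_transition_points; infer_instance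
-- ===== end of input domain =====

-- B replaces A's per-index zero/nonzero state machine by a run-based scan over maximal
-- nonzero runs (alternative decomposition, same cost); equivalence is about return values.


-- ===== PORT A =====
def find_horizontal_transition_points (row : List Int) : List Int :=
  let currently_zero : Bool := if PySem.List.pyGetD row 0 (0 : Int) = 0 then true else false
  let st := (PySem.List.pyRange 0 ((row.length : Int) - 1) 1).foldl
    (fun (st : Bool × List Int) i =>
      if st.1 then
        if PySem.List.pyGetD row (i + 1) 0 ≠ 0 then (false, st.2 ++ [i + 1]) else st
      else
        if PySem.List.pyGetD row (i + 1) 0 = 0 then (true, st.2 ++ [i]) else st)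
    (currently_zero, ([] : List Int))
  st.2

-- ===== PORT B =====
-- inner while loop of Source B: skip past the nonzero run, returning the remaining suffix and index
def pvBSkip : List Int → Int → List Int × Int
  | [], i => ([], i)
  | x :: xs, i => if x ≠ 0 then pvBSkip xs (i + 1) else (x :: xs, i)

-- needed by pvBMain's termination proof
theorem pvBSkip_length_le : ∀ (l : List Int) (i : Int), (pvBSkip l i).1.length ≤ l.length
  | [], _ => le_refl _
  | x :: xs, i => by
    simp only [pvBSkip]
    split
    · exact le_trans (pvBSkip_length_le xs (i + 1)) (Nat.le_succ _)
    · exact le_refl _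

-- outer while loop of Source B
def pvBMain (n : Int) : List Int → Int → List Int
  | [], _ => []
  | x :: xs, i =>
    if h : x ≠ 0 then
      let r := pvBSkip (x :: xs) i
      (if i ≠ 0 then [i] else []) ++ (if r.2 - 1 ≠ n - 1 then [r.2 - 1] else []) ++
        pvBMain n r.1 r.2
    else pvBMain n xs (i + 1)
termination_by l => l.length
decreasing_by
  · show (pvBSkip (x :: xs) i).1.length < (x :: xs).length
    simp only [pvBSkip, if_pos h]
    exact Nat.lt_succ_of_le (pvBSkip_length_le xs (i + 1))
  · simp

def find_horizontal_transition_points_alt (row : List Int) : List Int :=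
  pvBMain (row.length : Int) row 0

-- ===== PRECONDITION & SPEC =====
-- Pre_ excludes only the empty list, on which Python A raises IndexError reading the first element.
def Pre_find_horizontal_transition_points (row : List Int) : Prop := row ≠ []
instance (row : List Int) : Decidable (Pre_find_horizontal_transition_points row) := by unfold Pre_find_horizontal_transition_points; infer_instance
def pvWitness_find_horizontal_transition_points : List Int := [0, 5, 0]

def Spec_find_horizontal_transition_points (row : List Int) (out : List Int) : Prop := out = find_horizontal_transition_points_alt row
instance (row : List Int) (out : List Int) : Decidable (Spec_find_horizontal_transition_points row out) := by unfold Spec_find_horizontal_transition_points; infer_instance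

-- ===== CLAIM (what is proved, stated in full; the proofs are below) =====
def Claim_equal_find_horizontal_transition_points : Prop := ∀ (row : List Int), Dom_find_horizontal_transition_points row → Pre_find_horizontal_transition_points row → Spec_find_horizontal_transition_points row (find_horizontal_transition_points row)

-- ===== LEMMAS AND PROOFS =====

-- common reference value: scan of adjacent pairs, emitting i+1 on a 0→nonzero edge and
-- i on a nonzero→0 edge (i = absolute position of the left element of the pair)
def pairScan : List Int → Int → List Int
  | x :: y :: rest, i =>
    (if x = 0 then (if y ≠ 0 then [i + 1] else []) else (if y = 0 then [i] else [])) ++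
      pairScan (y :: rest) (i + 1)
  | _, _ => []

theorem pairScan_short (l : List Int) (i : Int) (h : l.length ≤ 1) : pairScan l i = [] := by
  match l with
  | [] => rfl
  | [x] => rfl
  | x :: y :: rest => simp at h

theorem pvBSkip_snd : ∀ (l : List Int) (i : Int),
    (pvBSkip l i).2 = i + (l.length : Int) - ((pvBSkip l i).1.length : Int)
  | [], i => by simp [pvBSkip]
  | x :: xs, i => by
    simp only [pvBSkip]
    split
    · rw [pvBSkip_snd xs (i + 1)]; push_cast [List.length_cons]; ring
    · simp

theorem pvBSkip_fst_head : ∀ (l : List Int) (i : Int),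
    (pvBSkip l i).1 = [] ∨ (pvBSkip l i).1.head? = some 0
  | [], _ => Or.inl rfl
  | x :: xs, i => by
    simp only [pvBSkip]
    split
    · exact pvBSkip_fst_head xs (i + 1)
    · right; simp_all

-- pairScan through a nonzero run: trailing boundary (if a zero follows) then the rest
theorem pairScan_run : ∀ (xs : List Int) (x : Int) (i : Int), x ≠ 0 →
    pairScan (x :: xs) i =
      (if (pvBSkip (x :: xs) i).1 ≠ [] then [(pvBSkip (x :: xs) i).2 - 1] else []) ++
        pairScan (pvBSkip (x :: xs) i).1 (pvBSkip (x :: xs) i).2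
  | [], x, i, hx => by simp [pairScan, pvBSkip, hx]
  | y :: rest, x, i, hx => by
    by_cases hy : y = 0
    · subst hy
      have h1 : (i + 1 - 1 : Int) = i := by ring
      simp [pairScan, pvBSkip, hx, h1]
    · have hskip : pvBSkip (x :: y :: rest) i = pvBSkip (y :: rest) (i + 1) := by
        simp [pvBSkip, hx]
      rw [show pairScan (x :: y :: rest) i = pairScan (y :: rest) (i + 1) by
        simp [pairScan, hx, hy]]
      rw [hskip]
      exact pairScan_run rest y (i + 1) hy

-- one nonzero run of pvBMain's body agrees with pairScan on that run
theorem pvRunCase (n : Int) (m : Nat)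
    (ih : ∀ (l : List Int) (i : Int), l.length ≤ m → 0 ≤ i → i + (l.length : Int) = n →
      (l = [] ∨ l.head? = some 0 ∨ i = 0) → pvBMain n l i = pairScan l i)
    (x : Int) (xs : List Int) (i : Int) (hx : x ≠ 0) (hm : xs.length ≤ m) (hi : 0 ≤ i)
    (hn : i + 1 + (xs.length : Int) = n) :
    ((if (pvBSkip (x :: xs) i).2 - 1 ≠ n - 1 then [(pvBSkip (x :: xs) i).2 - 1] else []) ++
      pvBMain n (pvBSkip (x :: xs) i).1 (pvBSkip (x :: xs) i).2) = pairScan (x :: xs) i := by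
  have hrun := pairScan_run xs x i hx
  have hhead := pvBSkip_fst_head (x :: xs) i
  have hsnd0 := pvBSkip_snd (x :: xs) i
  have hlen0 : (pvBSkip (x :: xs) i).1.length ≤ xs.length := by
    rw [show pvBSkip (x :: xs) i = pvBSkip xs (i + 1) from by simp [pvBSkip, hx]]
    exact pvBSkip_length_le xs (i + 1)
  rcases hE : pvBSkip (x :: xs) i with ⟨r1, r2⟩
  rw [hE] at hrun hhead hsnd0 hlen0
  simp only at hrun hhead hsnd0 hlen0
  have hlen' : (r1.length : Int) ≤ (xs.length : Int) := by exact_mod_cast hlen0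
  have hsnd : r2 = n - (r1.length : Int) := by
    rw [hsnd0]; push_cast [List.length_cons]; omega
  have hrest : pvBMain n r1 r2 = pairScan r1 r2 := by
    apply ih r1 r2 (le_trans hlen0 hm)
    · rw [hsnd]; omega
    · rw [hsnd]; ring
    · rcases hhead with h | h
      · exact Or.inl h
      · exact Or.inr (Or.inl h)
  rw [hrun, hrest]
  by_cases hne : r1 = []
  · have h2 : r2 - 1 = n - 1 := by rw [hsnd, hne]; simp
    simp [hne, h2]
  · have h2 : r2 - 1 ≠ n - 1 := by
      have : 0 < r1.length := List.length_pos_iff.mpr hne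
      rw [hsnd]; omega
    simp [hne, h2]

-- B's outer loop agrees with pairScan on any admissible suffix
theorem pvBMain_eq_pairScan (n : Int) : ∀ (m : Nat) (l : List Int) (i : Int),
    l.length ≤ m → 0 ≤ i → i + (l.length : Int) = n →
    (l = [] ∨ l.head? = some 0 ∨ i = 0) →
    pvBMain n l i = pairScan l i := by
  intro m
  induction m with
  | zero =>
    intro l i hm _ _ _
    have : l = [] := List.eq_nil_of_length_eq_zero (Nat.le_zero.mp hm)
    subst this; simp [pvBMain, pairScan]
  | succ m ih =>
    intro l i hm hi hn hctx
    match l with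
    | [] => simp [pvBMain, pairScan]
    | x :: xs =>
      by_cases hx : x = 0
      · subst hx
        rw [show pvBMain n (0 :: xs) i = pvBMain n xs (i + 1) from by simp [pvBMain]]
        match xs with
        | [] => simp [pvBMain, pairScan]
        | y :: rest =>
          by_cases hy : y = 0
          · rw [ih (y :: rest) (i + 1) (by simp at hm ⊢; omega)
                (by omega) (by simp at hn ⊢; omega)
                (Or.inr (Or.inl (by simp [hy])))]
            simp [pairScan, hy]
          · have hi1 : i + 1 ≠ 0 := by omega
            rw [show pvBMain n (y :: rest) (i + 1) =
                  (if i + 1 ≠ 0 then [i + 1] else []) ++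
                  ((if (pvBSkip (y :: rest) (i + 1)).2 - 1 ≠ n - 1 then
                    [(pvBSkip (y :: rest) (i + 1)).2 - 1] else []) ++
                  pvBMain n (pvBSkip (y :: rest) (i + 1)).1 (pvBSkip (y :: rest) (i + 1)).2)
                from by rw [pvBMain]; simp [hy]]
            rw [if_pos hi1]
            rw [show pairScan (0 :: y :: rest) i = [i + 1] ++ pairScan (y :: rest) (i + 1)
                from by simp [pairScan, hy]]
            exact congrArg ([i + 1] ++ ·)
              (pvRunCase n m ih y rest (i + 1) hy (by simp at hm; omega) (by omega)
                (by simp at hn ⊢; omega))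
      · have hi0 : i = 0 := by
          rcases hctx with h | h | h
          · simp at h
          · simp [hx] at h
          · exact h
        subst hi0
        rw [show pvBMain n (x :: xs) 0 =
              (if (0 : Int) ≠ 0 then [(0 : Int)] else []) ++
              ((if (pvBSkip (x :: xs) 0).2 - 1 ≠ n - 1 then
                [(pvBSkip (x :: xs) 0).2 - 1] else []) ++
              pvBMain n (pvBSkip (x :: xs) 0).1 (pvBSkip (x :: xs) 0).2)
            from by rw [pvBMain]; simp [hx]]
        rw [if_neg (by simp : ¬ ((0 : Int) ≠ 0))]
        rw [show ([] : List Int) ++ ((if (pvBSkip (x :: xs) 0).2 - 1 ≠ n - 1 then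
              [(pvBSkip (x :: xs) 0).2 - 1] else []) ++
              pvBMain n (pvBSkip (x :: xs) 0).1 (pvBSkip (x :: xs) 0).2) =
            ((if (pvBSkip (x :: xs) 0).2 - 1 ≠ n - 1 then
              [(pvBSkip (x :: xs) 0).2 - 1] else []) ++
              pvBMain n (pvBSkip (x :: xs) 0).1 (pvBSkip (x :: xs) 0).2) from List.nil_append _]
        exact pvRunCase n m ih x xs 0 hx (by simp at hm; omega) le_rfl
          (by simp at hn; omega)

theorem alt_eq_pairScan (row : List Int) :
    find_horizontal_transition_points_alt row = pairScan row 0 := by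
  unfold find_horizontal_transition_points_alt
  exact pvBMain_eq_pairScan (row.length : Int) row.length row 0 le_rfl le_rfl
    (by simp) (Or.inr (Or.inr rfl))

-- A's fold characterized: from position k with state (row[k] == 0), it appends pairScan of the suffix
theorem aFold_eq_pairScan (row : List Int) : ∀ (m : Nat) (k : Nat) (acc : List Int),
    row.length - 1 - k ≤ m → k < row.length →
    ((PySem.List.pyRange (k : Int) ((row.length : Int) - 1) 1).foldl
      (fun (st : Bool × List Int) i =>
        if st.1 then
          if PySem.List.pyGetD row (i + 1) 0 ≠ 0 then (false, st.2 ++ [i + 1]) else st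
        else
          if PySem.List.pyGetD row (i + 1) 0 = 0 then (true, st.2 ++ [i]) else st)
      ((if row.getD k 0 = 0 then true else false), acc)).2
    = acc ++ pairScan (row.drop k) (k : Int) := by
  intro m
  induction m with
  | zero =>
    intro k acc hm hk
    have hk1 : row.length = k + 1 := by omega
    rw [PySem.List.pyRange_one_eq_nil (by omega)]
    rw [pairScan_short _ _ (by simp; omega)]
    simp
  | succ m ih =>
    intro k acc hm hk
    by_cases hlast : row.length ≤ k + 1
    · have hk1 : row.length = k + 1 := by omega
      rw [PySem.List.pyRange_one_eq_nil (by omega)]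
      rw [pairScan_short _ _ (by simp; omega)]
      simp
    · have hk1 : k + 1 < row.length := by omega
      rw [PySem.List.pyRange_one_cons (by omega)]
      rw [List.foldl_cons]
      have hx : row.getD k 0 = row[k] := List.getD_eq_getElem row 0 hk
      have hx1 : row.getD (k + 1) 0 = row[k + 1] := List.getD_eq_getElem row 0 hk1
      have hy : PySem.List.pyGetD row ((k : Int) + 1) 0 = row[k + 1] := by
        rw [show ((k : Int) + 1) = ((k + 1 : Nat) : Int) from by push_cast; ring]
        rw [PySem.List.pyGetD_natCast]
        exact List.getD_eq_getElem row 0 hk1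
      have hcast : ((k + 1 : Nat) : Int) = (k : Int) + 1 := by push_cast; ring
      have hdk : row.drop k = row[k] :: row.drop (k + 1) := List.drop_eq_getElem_cons hk
      have hih := ih (k + 1)
        (acc ++ (if row[k] = 0 then (if row[k + 1] ≠ 0 then [(k : Int) + 1] else [])
                 else (if row[k + 1] = 0 then [(k : Int)] else []))) (by omega) hk1
      rw [hcast] at hih
      rw [hdk]
      rw [show pairScan (row[k] :: row.drop (k + 1)) (k : Int) =
            (if row[k] = 0 then (if row[k + 1] ≠ 0 then [(k : Int) + 1] else [])
             else (if row[k + 1] = 0 then [(k : Int)] else [])) ++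
              pairScan (row.drop (k + 1)) ((k : Int) + 1) from by
        rw [List.drop_eq_getElem_cons hk1, pairScan, ← List.drop_eq_getElem_cons hk1]]
      by_cases h0 : row[k] = 0 <;> by_cases h1 : row[k + 1] = 0 <;>
        simp only [hx, hx1, h0, h1, hy, ne_eq, not_true_eq_false, not_false_eq_true,
          if_pos, if_neg] at hih ⊢ <;>
        simpa using hih

theorem a_eq_pairScan (row : List Int) (h : row ≠ []) :
    find_horizontal_transition_points row = pairScan row 0 := by
  unfold find_horizontal_transition_points
  have hlen : 0 < row.length := List.length_pos_iff.mpr h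
  have h0 := aFold_eq_pairScan row row.length 0 [] (by omega) hlen
  simpa [PySem.List.pyGetD_zero] using h0

-- ===== VERDICT (by name: the statement is the Claim_ definition above) =====
theorem find_horizontal_transition_points_spec : Claim_equal_find_horizontal_transition_points := by
  intro row _ hpre
  unfold Spec_find_horizontal_transition_points
  rw [a_eq_pairScan row hpre, alt_eq_pairScan row]
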